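-- pv_equiv track=rewrite | github.com/topgammon/Backgammon-Arena | backend/python_ai_service.py | count_exposed_blots
-- ===== SOURCE A (Python) =====
-- def count_exposed_blots(checkers, player):
--     """
--     Count exposed blots (single pieces that can be hit by opponent)
--     A blot is a single piece on a point (not protected by having 2+ pieces)
--     """
--     # Count unique points that have exactly 1 piece (blots)
--     blots_by_point = {}
--
--     # First, count pieces per point for this player
--     for checker in checkers:
--         if checker.get('player') == player:
--             point = checker.get('point', -1)
--             if 0 <= point <= 23:  # On board (not bar or borne off)
--                 if point not in blots_by_point:
--                     # Count how many pieces of this player are on this point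
--                     pieces_on_point = sum(1 for c in checkers
--                                         if c.get('point') == point and c.get('player') == player)
--                     # If only 1 piece, it's a blot (exposed/vulnerable)
--                     if pieces_on_point == 1:
--                         blots_by_point[point] = True
--                     else:
--                         blots_by_point[point] = False  # Mark as not a blot (protected)
--
--     # Return count of points with blots
--     return sum(1 for is_blot in blots_by_point.values() if is_blot)
-- ===== SOURCE B (Python) =====
-- def count_exposed_blots(checkers, player):
--     """Single-pass tally: count checkers per on-board point for this player,
--     then count the points holding exactly one checker."""
--     counts = {}
--     for c in checkers:
--         if c.get('player') == player:
--             p = c.get('point', -1)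
--             if 0 <= p <= 23:
--                 counts[p] = counts.get(p, 0) + 1
--     return sum(1 for v in counts.values() if v == 1)
-- ===== Notes on version B (the rewrite author's own statement) =====
-- stated objective: alternative
-- what changed: Replaced A's blot dict built by rescanning the whole checker list once per newly seen point with a single-pass per-point tally dict whose values equal to 1 are counted at the end.
import Mathlib
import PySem

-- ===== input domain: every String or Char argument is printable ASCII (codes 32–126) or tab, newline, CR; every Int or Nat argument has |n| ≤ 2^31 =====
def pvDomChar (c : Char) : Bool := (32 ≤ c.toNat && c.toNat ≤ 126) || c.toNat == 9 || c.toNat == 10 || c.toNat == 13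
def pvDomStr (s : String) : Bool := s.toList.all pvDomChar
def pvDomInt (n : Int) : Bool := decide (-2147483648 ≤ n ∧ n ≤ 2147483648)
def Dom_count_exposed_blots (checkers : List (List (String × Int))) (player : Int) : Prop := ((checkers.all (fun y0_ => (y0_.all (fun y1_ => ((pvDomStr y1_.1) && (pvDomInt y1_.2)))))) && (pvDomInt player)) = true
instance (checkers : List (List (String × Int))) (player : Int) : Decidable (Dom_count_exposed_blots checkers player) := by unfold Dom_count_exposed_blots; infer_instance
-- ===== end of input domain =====

-- ===== PORT A =====
def count_exposed_blots (checkers : List (List (String × Int))) (player : Int) : Int :=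
  -- blots_by_point = {}; for checker in checkers: ...
  let blots : PySem.Dict Int Bool := checkers.foldl (fun d checker =>
    if (PySem.Dict.mk checker).get? "player" = some player then
      let point : Int := (PySem.Dict.mk checker).getD "point" (-1)
      if 0 ≤ point ∧ point ≤ 23 then
        if d.contains point then d
        else
          -- pieces_on_point = sum(1 for c in checkers if c.get('point') == point and c.get('player') == player)
          let pieces : Int := checkers.foldl (fun n c =>
            if (PySem.Dict.mk c).get? "point" = some point ∧ (PySem.Dict.mk c).get? "player" = some player
            then n + 1 else n) 0
          d.insert point (pieces == 1)
      else d
    else d) PySem.Dict.empty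
  -- sum(1 for is_blot in blots_by_point.values() if is_blot)
  blots.values.foldl (fun s b => if b then s + 1 else s) 0

-- ===== PORT B =====
def count_exposed_blots_alt (checkers : List (List (String × Int))) (player : Int) : Int :=
  -- counts = {}; single pass tally
  let counts : PySem.Dict Int Int := checkers.foldl (fun d c =>
    if (PySem.Dict.mk c).get? "player" = some player then
      let p : Int := (PySem.Dict.mk c).getD "point" (-1)
      if 0 ≤ p ∧ p ≤ 23 then d.insert p (d.getD p 0 + 1) else d
    else d) PySem.Dict.empty
  -- sum(1 for v in counts.values() if v == 1)
  counts.values.foldl (fun s v => if v == 1 then s + 1 else s) 0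

-- ===== PRECONDITION & SPEC =====
def Spec_count_exposed_blots (checkers : List (List (String × Int))) (player : Int) (out : Int) : Prop := out = count_exposed_blots_alt checkers player
instance (checkers : List (List (String × Int))) (player : Int) (out : Int) : Decidable (Spec_count_exposed_blots checkers player out) := by unfold Spec_count_exposed_blots; infer_instance

-- ===== CLAIM (what is proved, stated in full; the proofs are below) =====
def Claim_equal_count_exposed_blots : Prop := ∀ (checkers : List (List (String × Int))) (player : Int), Dom_count_exposed_blots checkers player → Spec_count_exposed_blots checkers player (count_exposed_blots checkers player)

-- ===== LEMMAS AND PROOFS =====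

-- the point stored in a checker dict (default -1), and the filter both loops apply
def pvPtval (c : List (String × Int)) : Int := (PySem.Dict.mk c).getD "point" (-1)

def pvCond (player : Int) (c : List (String × Int)) : Bool :=
  decide ((PySem.Dict.mk c).get? "player" = some player) && decide (0 ≤ pvPtval c ∧ pvPtval c ≤ 23)

-- the on-board points of this player's checkers, one entry per checker, in list order
def pvPts (checkers : List (List (String × Int))) (player : Int) : List Int :=
  (checkers.filter (pvCond player)).map pvPtval

-- A's inner rescan counts exactly the multiplicity of p in pvPts (for an on-board p)
theorem pvCnt (checkers : List (List (String × Int))) (player p : Int) (hp : 0 ≤ p ∧ p ≤ 23) :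
    checkers.countP (fun c => decide ((PySem.Dict.mk c).get? "point" = some p ∧ (PySem.Dict.mk c).get? "player" = some player))
    = (pvPts checkers player).count p := by
  rw [pvPts, List.count_eq_countP, List.countP_map, List.countP_filter]
  apply List.countP_congr
  intro c _
  cases h : (PySem.Dict.mk c).get? "point" with
  | none =>
      simp [pvPtval, pvCond, PySem.Dict.getD_eq_get?_getD, h]
  | some v =>
      simp [pvPtval, pvCond, PySem.Dict.getD_eq_get?_getD, h, eq_comm (a := v) (b := p)]
      intro h1 _
      exact h1 ▸ hp

-- an insert-if-fresh fold over F appends exactly the first occurrences of F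
theorem pvFreshFold (f : Int → Bool) (F : List Int) : ∀ (S : List Int),
    F.foldl (fun d p => if d.contains p then d else d.insert p (f p))
      (PySem.Dict.mk (S.map (fun p => (p, f p))))
    = PySem.Dict.mk ((PySem.Set.update S F).map (fun p => (p, f p))) := by
  induction F with
  | nil => intro S; rfl
  | cons p F ih =>
    intro S
    simp only [List.foldl_cons]
    have hc : (PySem.Dict.mk (S.map (fun p => (p, f p)))).contains p = S.contains p := by
      rw [PySem.Dict.contains_mk, List.any_map]
      exact List.any_beq'
    show _ = PySem.Dict.mk ((PySem.Set.update (PySem.Set.add S p) F).map (fun p => (p, f p)))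
    by_cases h : p ∈ S
    · rw [if_pos (by rw [hc]; simpa using h)]
      have hcp : S.contains p = true := by simpa using h
      have hS : PySem.Set.add S p = S := by
        unfold PySem.Set.add
        rw [PySem.Set.contains_eq_listContains, if_pos hcp]
      rw [hS]
      exact ih S
    · rw [if_neg (by rw [hc]; simpa using h)]
      have hins : (PySem.Dict.mk (S.map (fun p => (p, f p)))).insert p (f p)
          = PySem.Dict.mk ((S ++ [p]).map (fun q => (q, f q))) := by
        apply PySem.Dict.ext
        rw [PySem.Dict.items_insert_of_not_contains _ _ (by rw [hc]; simpa using h)]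
        simp
      rw [hins]
      have hcp : S.contains p = false := by simpa using h
      have hS : PySem.Set.add S p = S ++ [p] := by
        unfold PySem.Set.add
        rw [PySem.Set.contains_eq_listContains, hcp]
        simp
      rw [hS]
      exact ih (S ++ [p])

theorem pvB_eq (checkers : List (List (String × Int))) (player : Int) :
    count_exposed_blots_alt checkers player
      = (((PySem.Set.ofList (pvPts checkers player)).map
          (fun p => ((pvPts checkers player).count p : Int))).count 1 : Int) := by
  have hbody : (fun (d : PySem.Dict Int Int) (c : List (String × Int)) =>
      if (PySem.Dict.mk c).get? "player" = some player then
        let p : Int := (PySem.Dict.mk c).getD "point" (-1)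
        if 0 ≤ p ∧ p ≤ 23 then d.insert p (d.getD p 0 + 1) else d
      else d)
      = (fun d c => if pvCond player c then d.insert (pvPtval c) (d.getD (pvPtval c) 0 + 1) else d) := by
    funext d c
    by_cases h1 : (PySem.Dict.mk c).get? "player" = some player
    · by_cases h2 : 0 ≤ (PySem.Dict.mk c).getD "point" (-1) ∧ (PySem.Dict.mk c).getD "point" (-1) ≤ 23
      · simp [pvCond, pvPtval, h1, h2]
      · simp [pvCond, pvPtval, h1, h2]
    · simp [pvCond, h1]
  have hdict : (checkers.foldl (fun (d : PySem.Dict Int Int) c =>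
      if (PySem.Dict.mk c).get? "player" = some player then
        let p : Int := (PySem.Dict.mk c).getD "point" (-1)
        if 0 ≤ p ∧ p ≤ 23 then d.insert p (d.getD p 0 + 1) else d
      else d) PySem.Dict.empty) = PySem.Dict.counter (pvPts checkers player) := by
    rw [hbody, PySem.List.foldl_if_eq_foldl_filter,
        ← List.foldl_map (f := pvPtval) (g := fun (d : PySem.Dict Int Int) p => d.insert p (d.getD p 0 + 1)),
        PySem.Dict.foldl_insert_getD_add_one_eq_counter, ← pvPts]
  show (checkers.foldl _ PySem.Dict.empty).values.foldl _ 0 = _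
  rw [hdict, PySem.List.foldl_beq_add_one]
  have hv : (PySem.Dict.counter (pvPts checkers player)).values
      = (PySem.Set.ofList (pvPts checkers player)).map (fun p => ((pvPts checkers player).count p : Int)) := by
    rw [show ∀ (d : PySem.Dict Int Int), d.values = d.items.map (·.2) from fun _ => rfl,
        PySem.Dict.items_counter, List.map_map]
    rfl
  rw [hv, zero_add]

theorem pvA_eq (checkers : List (List (String × Int))) (player : Int) :
    count_exposed_blots checkers player
      = (((PySem.Set.ofList (pvPts checkers player)).map
          (fun p => ((pvPts checkers player).count p : Int))).count 1 : Int) := by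
  have hbody : (fun (d : PySem.Dict Int Bool) (checker : List (String × Int)) =>
      if (PySem.Dict.mk checker).get? "player" = some player then
        let point : Int := (PySem.Dict.mk checker).getD "point" (-1)
        if 0 ≤ point ∧ point ≤ 23 then
          if d.contains point then d
          else
            let pieces : Int := checkers.foldl (fun n c =>
              if (PySem.Dict.mk c).get? "point" = some point ∧ (PySem.Dict.mk c).get? "player" = some player
              then n + 1 else n) 0
            d.insert point (pieces == 1)
        else d
      else d)
      = (fun d c => if pvCond player c then
          (if d.contains (pvPtval c) then d
           else d.insert (pvPtval c) ((((pvPts checkers player).count (pvPtval c) : Int)) == 1))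
        else d) := by
    funext d c
    by_cases h1 : (PySem.Dict.mk c).get? "player" = some player
    · by_cases h2 : 0 ≤ (PySem.Dict.mk c).getD "point" (-1) ∧ (PySem.Dict.mk c).getD "point" (-1) ≤ 23
      · have hcond : pvCond player c = true := by simp [pvCond, pvPtval, h1, h2]
        simp only [if_pos h1, if_pos h2, hcond, if_true]
        rw [PySem.List.foldl_ite_add_one
              (p := fun c' => (PySem.Dict.mk c').get? "point" = some ((PySem.Dict.mk c).getD "point" (-1))
                    ∧ (PySem.Dict.mk c').get? "player" = some player),
            pvCnt checkers player _ h2, zero_add]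
        rfl
      · simp [pvCond, pvPtval, h1, h2]
    · simp [pvCond, h1]
  have hdict : (checkers.foldl (fun (d : PySem.Dict Int Bool) checker =>
      if (PySem.Dict.mk checker).get? "player" = some player then
        let point : Int := (PySem.Dict.mk checker).getD "point" (-1)
        if 0 ≤ point ∧ point ≤ 23 then
          if d.contains point then d
          else
            let pieces : Int := checkers.foldl (fun n c =>
              if (PySem.Dict.mk c).get? "point" = some point ∧ (PySem.Dict.mk c).get? "player" = some player
              then n + 1 else n) 0
            d.insert point (pieces == 1)
        else d
      else d) PySem.Dict.empty)
      = PySem.Dict.mk ((PySem.Set.update ([] : List Int) (pvPts checkers player)).map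
          (fun p => (p, (((pvPts checkers player).count p : Int)) == 1))) := by
    rw [hbody, PySem.List.foldl_if_eq_foldl_filter,
        ← List.foldl_map (f := pvPtval)
          (g := fun (d : PySem.Dict Int Bool) p =>
            if d.contains p then d else d.insert p ((((pvPts checkers player).count p : Int)) == 1)),
        ← pvPts]
    rw [show (PySem.Dict.empty : PySem.Dict Int Bool)
          = PySem.Dict.mk (([] : List Int).map (fun p => (p, (((pvPts checkers player).count p : Int)) == 1))) from rfl,
        pvFreshFold]
  show (checkers.foldl _ PySem.Dict.empty).values.foldl _ 0 = _
  rw [hdict, PySem.List.foldl_if_add_one (p := fun b => b)]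
  have hv : (PySem.Dict.mk ((PySem.Set.update ([] : List Int) (pvPts checkers player)).map
        (fun p => (p, (((pvPts checkers player).count p : Int)) == 1)))).values
      = (PySem.Set.update ([] : List Int) (pvPts checkers player)).map
          (fun p => (((pvPts checkers player).count p : Int)) == 1) := by
    rw [show ∀ (l : List (Int × Bool)), (PySem.Dict.mk l).values = l.map (·.2) from fun _ => rfl,
        List.map_map]
    simp [Function.comp_def]
  have hof : PySem.Set.update ([] : List Int) (pvPts checkers player)
      = PySem.Set.ofList (pvPts checkers player) := (PySem.Set.ofList_eq_foldl _).symm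
  rw [hv, zero_add, hof, List.countP_map, List.count_eq_countP, List.countP_map]
  rfl

-- ===== VERDICT (by name: the statement is the Claim_ definition above) =====
theorem count_exposed_blots_spec : Claim_equal_count_exposed_blots := by
  intro checkers player _
  unfold Spec_count_exposed_blots
  rw [pvA_eq, pvB_eq]
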